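-- pv_equiv track=rewrite | github.com/AshfarF/InfotactSolution_Real-time-Public-Transit-Ghost-Bus-Detector | backend/app/detector.py | _calculate_severity
-- ===== SOURCE A (Python) =====
-- from typing import Dict, List, Tuple, Optional
--
-- def _calculate_severity(anomaly_types: List[str]) -> str:
--     """Calculate severity based on anomaly types"""
--     if not anomaly_types:
--         return "info"
--
--     critical_anomalies = {"stale_data", "off_route"}
--     warning_anomalies = {"stationary_non_stop", "speed_spike", "speed_drop"}
--
--     if any(anomaly in critical_anomalies for anomaly in anomaly_types):
--         return "critical"
--     elif any(anomaly in warning_anomalies for anomaly in anomaly_types):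
--         return "warning"
--     else:
--         return "info"
-- ===== SOURCE B (Python) =====
-- def _calculate_severity(anomaly_types):
--     """Calculate severity based on anomaly types"""
--     rank_of = {
--         "stale_data": 2,
--         "off_route": 2,
--         "stationary_non_stop": 1,
--         "speed_spike": 1,
--         "speed_drop": 1,
--     }
--     rank = 0
--     for a in anomaly_types:
--         r = rank_of.get(a, 0)
--         if rank < r:
--             rank = r
--     if rank == 2:
--         return "critical"
--     if rank == 1:
--         return "warning"
--     return "info"
-- ===== Notes on version B (the rewrite author's own statement) =====
-- stated objective: alternative
-- what changed: Replaces the empty-list guard plus two any()-membership scans with a single pass that keeps a running maximum severity rank looked up in one rank table, mapped to a label at the end.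
import Mathlib
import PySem

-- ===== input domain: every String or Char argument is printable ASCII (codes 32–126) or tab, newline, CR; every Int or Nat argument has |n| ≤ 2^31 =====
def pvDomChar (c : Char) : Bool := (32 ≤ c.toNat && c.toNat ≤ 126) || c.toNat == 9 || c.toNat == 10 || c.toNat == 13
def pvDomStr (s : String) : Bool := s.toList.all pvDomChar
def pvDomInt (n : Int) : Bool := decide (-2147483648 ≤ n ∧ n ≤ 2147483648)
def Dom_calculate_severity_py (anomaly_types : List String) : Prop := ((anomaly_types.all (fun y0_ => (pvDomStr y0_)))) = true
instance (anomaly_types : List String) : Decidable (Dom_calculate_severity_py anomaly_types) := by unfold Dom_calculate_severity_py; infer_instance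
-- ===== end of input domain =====

-- B replaces the empty-list guard and the two any()-membership scans with a single
-- running-maximum-rank pass over one rank table (alternative decomposition, same cost).

-- ===== PORT A =====
def pvCriticalSet : PySem.Set String := PySem.Set.ofList ["stale_data", "off_route"]
def pvWarningSet : PySem.Set String := PySem.Set.ofList ["stationary_non_stop", "speed_spike", "speed_drop"]

def calculate_severity_py (anomaly_types : List String) : String :=
  if anomaly_types = [] then "info"
  else if anomaly_types.any (fun anomaly => PySem.Set.contains pvCriticalSet anomaly) then "critical"
  else if anomaly_types.any (fun anomaly => PySem.Set.contains pvWarningSet anomaly) then "warning"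
  else "info"

-- ===== PORT B =====
def pvRankOf : PySem.Dict String Int :=
  PySem.Dict.ofList [("stale_data", 2), ("off_route", 2), ("stationary_non_stop", 1), ("speed_spike", 1), ("speed_drop", 1)]

def calculate_severity_py_alt (anomaly_types : List String) : String :=
  let rank := anomaly_types.foldl
    (fun rank a =>
      let r := PySem.Dict.getD pvRankOf a 0
      if rank < r then r else rank) 0
  if rank = 2 then "critical"
  else if rank = 1 then "warning"
  else "info"

-- ===== PRECONDITION & SPEC =====
def Spec_calculate_severity_py (anomaly_types : List String) (out : String) : Prop := out = calculate_severity_py_alt anomaly_types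
instance (anomaly_types : List String) (out : String) : Decidable (Spec_calculate_severity_py anomaly_types out) := by unfold Spec_calculate_severity_py; infer_instance

-- ===== CLAIM (what is proved, stated in full; the proofs are below) =====
def Claim_equal_calculate_severity_py : Prop := ∀ (anomaly_types : List String), Dom_calculate_severity_py anomaly_types → Spec_calculate_severity_py anomaly_types (calculate_severity_py anomaly_types)

-- ===== LEMMAS AND PROOFS =====

theorem pvRank_eq (a : String) :
    PySem.Dict.getD pvRankOf a 0 =
      if PySem.Set.contains pvCriticalSet a then 2
      else if PySem.Set.contains pvWarningSet a then 1
      else 0 := by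
  by_cases h1 : a = "stale_data" <;> by_cases h2 : a = "off_route" <;>
    by_cases h3 : a = "stationary_non_stop" <;> by_cases h4 : a = "speed_spike" <;>
    by_cases h5 : a = "speed_drop" <;>
    simp_all [pvRankOf, pvCriticalSet, pvWarningSet, PySem.Dict.ofList, PySem.Dict.update,
      List.foldl, PySem.Dict.getD_insert, PySem.Dict.getD_empty, PySem.Set.ofList,
      PySem.Set.contains]

theorem pvFold_char (xs : List String) : ∀ r : Int, 0 ≤ r →
    xs.foldl (fun rank a =>
      let v := PySem.Dict.getD pvRankOf a 0
      if rank < v then v else rank) r =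
    (if xs.any (fun a => PySem.Set.contains pvCriticalSet a) then max r 2
     else if xs.any (fun a => PySem.Set.contains pvWarningSet a) then max r 1
     else r) := by
  induction xs with
  | nil => intro r _; simp
  | cons a t ih =>
    intro r hr
    simp only [List.foldl_cons, List.any_cons, pvRank_eq a]
    rcases Bool.eq_false_or_eq_true (PySem.Set.contains pvCriticalSet a) with h1 | h1 <;>
      rcases Bool.eq_false_or_eq_true (PySem.Set.contains pvWarningSet a) with h2 | h2 <;>
      simp only [h1, h2, Bool.false_eq_true, ite_true, ite_false,
        Bool.false_or, Bool.true_or] <;>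
      rw [ih _ (by split_ifs <;> omega)] <;>
      simp only [max_def] <;>
      split_ifs <;> omega

theorem calculate_severity_py_eq (anomaly_types : List String) :
    calculate_severity_py anomaly_types = calculate_severity_py_alt anomaly_types := by
  unfold calculate_severity_py calculate_severity_py_alt
  simp only [pvFold_char anomaly_types 0 (by omega)]
  cases hc : anomaly_types.any (fun a => PySem.Set.contains pvCriticalSet a) <;>
    cases hw : anomaly_types.any (fun a => PySem.Set.contains pvWarningSet a) <;>
    simp only [hc, hw, Bool.false_eq_true, Bool.true_eq_false, ite_true, ite_false,
      if_true, if_false] <;>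
    split_ifs <;> simp_all <;> omega

-- ===== VERDICT (by name: the statement is the Claim_ definition above) =====
theorem calculate_severity_py_spec : Claim_equal_calculate_severity_py := by
  intro anomaly_types _
  exact calculate_severity_py_eq anomaly_types
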